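-- pv_equiv track=rewrite | github.com/rmfpafls/coding_test | 프로그래머스/0/181829. 이차원 배열 대각선 순회하기/이차원 배열 대각선 순회하기.py | solution
-- ===== SOURCE A (Python) =====
-- def solution(board, k):
--     cnt = 0
--     len_board = len(board)
--     for i in range(len_board):
--         for j in range(len(board[i])):
--             if i+j < k or i+j == k:
--                 cnt += board[i][j]
--     return cnt
-- ===== SOURCE B (Python) =====
-- def solution(board, k):
--     max_d = max((i + len(row) for i, row in enumerate(board)), default=0)
--     total = 0
--     for d in range(min(k + 1, max_d)):
--         for i, row in enumerate(board):
--             j = d - i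
--             if 0 <= j < len(row):
--                 total += row[j]
--     return total
-- ===== Notes on version B (the rewrite author's own statement) =====
-- stated objective: alternative
-- what changed: Traverses the matrix by anti-diagonals: an outer loop over the diagonal index d in range(min(k+1, max diagonal)) and an inner loop reconstructing column j = d - i per row, instead of A's row/column double loop with a per-cell i+j<=k test.
import Mathlib
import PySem

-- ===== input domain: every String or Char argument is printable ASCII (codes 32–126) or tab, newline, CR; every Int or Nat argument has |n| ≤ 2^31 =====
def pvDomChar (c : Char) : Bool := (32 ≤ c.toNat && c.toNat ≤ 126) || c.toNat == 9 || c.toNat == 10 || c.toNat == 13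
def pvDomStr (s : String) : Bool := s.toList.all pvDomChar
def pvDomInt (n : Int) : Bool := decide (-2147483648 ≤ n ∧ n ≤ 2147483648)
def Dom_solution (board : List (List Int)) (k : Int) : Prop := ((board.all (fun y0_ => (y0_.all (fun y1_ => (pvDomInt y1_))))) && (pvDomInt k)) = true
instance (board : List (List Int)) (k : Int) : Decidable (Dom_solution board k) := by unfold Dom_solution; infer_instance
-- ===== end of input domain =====

-- B traverses the matrix by anti-diagonals (outer loop on d = i+j, inner loop reconstructing j = d-i per row) instead of A's row/column double loop with a per-cell i+j<=k test; alternative traversal, equal return values.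


-- ===== PORT A =====
-- inner loop: for j over row, add board[i][j] when i+j < k or i+j == k (j carried as the index)
def solArow (row : List Int) (i j k : Int) : Int :=
  match row with
  | [] => 0
  | x :: xs => (if i + j < k ∨ i + j = k then x else 0) + solArow xs i (j + 1) k

-- outer loop: for i over the rows
def solArows (rows : List (List Int)) (i k : Int) : Int :=
  match rows with
  | [] => 0
  | r :: rs => solArow r i 0 k + solArows rs (i + 1) k

def solution (board : List (List Int)) (k : Int) : Int := solArows board 0 k

-- ===== PORT B =====
-- inner body: j = d - i; if 0 <= j < len(row): total += row[j]
def cellB (row : List Int) (j : Int) : Int :=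
  if 0 ≤ j ∧ j < (row.length : Int) then row.getD j.toNat 0 else 0

-- inner loop: for i, row in enumerate(board), adding row[d-i] when in range
def diagSum (rows : List (List Int)) (i d : Int) : Int :=
  match rows with
  | [] => 0
  | r :: rs => cellB r (d - i) + diagSum rs (i + 1) d

-- max_d = max((i + len(row) for i, row in enumerate(board)), default=0)
-- (all terms are >= 0 for i >= 0, so folding max with a trailing 0 equals Python's max-with-default-0)
def maxD (rows : List (List Int)) (i : Int) : Int :=
  match rows with
  | [] => 0
  | r :: rs => max (i + (r.length : Int)) (maxD rs (i + 1))

-- outer loop: for d in range(min(k + 1, max_d)), accumulating total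
def solution_alt (board : List (List Int)) (k : Int) : Int :=
  (List.range (min (k + 1) (maxD board 0)).toNat).foldl
    (fun total (d : Nat) => total + diagSum board 0 (d : Int)) 0

-- ===== PRECONDITION & SPEC =====
def Spec_solution (board : List (List Int)) (k : Int) (out : Int) : Prop := out = solution_alt board k
instance (board : List (List Int)) (k : Int) (out : Int) : Decidable (Spec_solution board k out) := by unfold Spec_solution; infer_instance

-- ===== CLAIM (what is proved, stated in full; the proofs are below) =====
def Claim_equal_solution : Prop := ∀ (board : List (List Int)) (k : Int), Dom_solution board k → Spec_solution board k (solution board k)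

-- ===== LEMMAS AND PROOFS =====

-- accumulating foldl is the sum over the range
theorem foldl_add_sum (f : Nat → Int) (l : List Nat) (a : Int) :
    l.foldl (fun acc d => acc + f d) a = a + (l.map f).sum := by
  induction l generalizing a with
  | nil => simp
  | cons x xs ih => simp [List.foldl, ih, add_assoc]

theorem sum_map_range (f : Nat → Int) (m : Nat) :
    ((List.range m).map f).sum = ∑ d ∈ Finset.range m, f d := by
  induction m with
  | zero => simp
  | succ n ih => rw [List.range_succ, List.map_append, List.sum_append, ih,
      Finset.sum_range_succ]; simp

-- A's inner loop sums exactly a prefix of the row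
theorem solArow_eq_take (row : List Int) (i j k : Int) :
    solArow row i j k = (row.take (max 0 (k - i - j + 1)).toNat).sum := by
  induction row generalizing j with
  | nil => simp [solArow]
  | cons x xs ih =>
    rw [solArow, ih]
    by_cases h : i + j < k ∨ i + j = k
    · have h1 : (max 0 (k - i - j + 1)).toNat = (max 0 (k - i - (j + 1) + 1)).toNat + 1 := by
        omega
      simp only [if_pos h, h1, List.take_succ_cons, List.sum_cons]
    · have h0 : (max 0 (k - i - j + 1)).toNat = 0 := by omega
      have h0' : (max 0 (k - i - (j + 1) + 1)).toNat = 0 := by omega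
      simp [if_neg h, h0, h0']

-- peeling a row off cellB
theorem cellB_cons (x : Int) (xs : List Int) (j : Int) :
    cellB (x :: xs) j = (if j = 0 then x else 0) + cellB xs (j - 1) := by
  unfold cellB
  by_cases h0 : j = 0
  · subst h0; simp
  · by_cases hin : 0 ≤ j ∧ j < ((x :: xs).length : Int)
    · have h1 : 1 ≤ j := by omega
      have hj : j.toNat = (j - 1).toNat + 1 := by omega
      have hin' : 0 ≤ j - 1 ∧ j - 1 < (xs.length : Int) := by
        simp only [List.length_cons] at hin; push_cast at hin ⊢; omega
      rw [if_pos hin, if_pos hin', hj, List.getD_cons_succ]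
      simp [h0]
    · have hin' : ¬ (0 ≤ j - 1 ∧ j - 1 < (xs.length : Int)) := by
        simp only [List.length_cons] at hin; push_cast at hin ⊢; omega
      rw [if_neg hin, if_neg hin']
      simp [h0]

-- the diagonal sum of one row over d < m is a prefix of the row
theorem row_diag_sum (r : List Int) (i : Int) (m : Nat) (hi : 0 ≤ i) :
    (∑ d ∈ Finset.range m, cellB r ((d : Int) - i))
      = (r.take (max 0 (min ((m : Int) - i) (r.length : Int))).toNat).sum := by
  induction r generalizing i with
  | nil => simp [cellB]
  | cons x xs ih =>
    have hsplit : ∀ d ∈ Finset.range m,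
        cellB (x :: xs) ((d : Int) - i)
          = (if d = i.toNat then x else 0) + cellB xs ((d : Int) - (i + 1)) := by
      intro d _
      rw [cellB_cons]
      have harg : (d : Int) - i - 1 = (d : Int) - (i + 1) := by ring
      rw [harg]
      by_cases hd : (d : Int) - i = 0
      · rw [if_pos hd, if_pos (by omega)]
      · rw [if_neg hd, if_neg (by omega)]
    rw [Finset.sum_congr rfl hsplit, Finset.sum_add_distrib,
      Finset.sum_ite_eq' (Finset.range m) i.toNat (fun _ => x),
      ih (i + 1) (by omega)]
    by_cases hm : i.toNat ∈ Finset.range m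
    · have him : i < (m : Int) := by simp [Finset.mem_range] at hm; omega
      have ht : (max 0 (min ((m : Int) - i) ((x :: xs).length : Int))).toNat
          = (max 0 (min ((m : Int) - (i + 1)) ((xs.length : Int)))).toNat + 1 := by
        simp only [List.length_cons]; push_cast; omega
      rw [if_pos hm, ht, List.take_succ_cons, List.sum_cons]
    · have him : (m : Int) ≤ i := by simp [Finset.mem_range] at hm; omega
      have ht : (max 0 (min ((m : Int) - i) ((x :: xs).length : Int))).toNat = 0 := by omega
      have ht' : (max 0 (min ((m : Int) - (i + 1)) ((xs.length : Int)))).toNat = 0 := by omega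
      rw [if_neg hm, ht, ht']
      simp

-- the outer diagonal loop equals A's row loop
theorem diag_rows (rows : List (List Int)) (i maxd k : Int)
    (hi : 0 ≤ i) (hb : maxD rows i ≤ maxd) :
    (∑ d ∈ Finset.range (min (k + 1) maxd).toNat, diagSum rows i (d : Int))
      = solArows rows i k := by
  induction rows generalizing i with
  | nil => simp [diagSum, solArows]
  | cons r rs ih =>
    have hb1 : i + (r.length : Int) ≤ maxd := by
      have := le_max_left (i + (r.length : Int)) (maxD rs (i + 1)); unfold maxD at hb; omega
    have hb2 : maxD rs (i + 1) ≤ maxd := by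
      have := le_max_right (i + (r.length : Int)) (maxD rs (i + 1)); unfold maxD at hb; omega
    simp only [diagSum, Finset.sum_add_distrib]
    rw [ih (i + 1) (by omega) hb2, row_diag_sum r i _ hi, solArows, solArow_eq_take]
    congr 2
    rw [List.take_eq_take_iff]
    omega

-- ===== VERDICT (by name: the statement is the Claim_ definition above) =====
theorem solution_spec : Claim_equal_solution := by
  intro board k _
  unfold Spec_solution solution solution_alt
  rw [foldl_add_sum, sum_map_range, zero_add]
  exact (diag_rows board 0 (maxD board 0) k le_rfl le_rfl).symm
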